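-- pv_equiv track=rewrite | github.com/JrJessyLuo/multitab_qa_dmral | code/decomposer/group_information_needs.py | build_table2group
-- ===== SOURCE A (Python) =====
-- from collections import defaultdict
--
-- class UnionFind:
--     def __init__(self):
--         self.parent = dict()
--
--     def find(self, x):
--         if x not in self.parent:
--             self.parent[x] = x
--         while self.parent[x] != x:
--             self.parent[x] = self.parent[self.parent[x]]  # path compression
--             x = self.parent[x]
--         return x
--
--     def union(self, x, y):
--         self.parent[self.find(x)] = self.find(y)
--
-- def build_table2group(estimated_overlap_tabpairs):
--     uf = UnionFind()
--     for t1, t2 in estimated_overlap_tabpairs: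
--         uf.union(t1, t2)
--
--     group_map = defaultdict(list)
--     for table in uf.parent:
--         root = uf.find(table)
--         group_map[root].append(table)
--
--     table2group = {}
--     for group_id, tables in enumerate(group_map.values()):
--         for table in tables:
--             table2group[table] = f"group{group_id}"
--
--     return table2group
-- ===== SOURCE B (Python) =====
-- def build_table2group(estimated_overlap_tabpairs):
--     # Flat label map: each table maps directly to its component's representative.
--     # A union makes t2's representative win (and t2 is registered first, matching
--     # Python's RHS-before-target evaluation in A), relabelling t1's whole class.
--     rep = {}
--     for t1, t2 in estimated_overlap_tabpairs:
--         r2 = rep.setdefault(t2, t2)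
--         r1 = rep.setdefault(t1, t1)
--         if r1 != r2:
--             rep = {k: (r2 if v == r1 else v) for k, v in rep.items()}
--
--     buckets = {}
--     for t, r in rep.items():
--         buckets.setdefault(r, []).append(t)
--
--     return {t: f"group{i}"
--             for i, ts in enumerate(buckets.values())
--             for t in ts}
-- ===== Notes on version B (the rewrite author's own statement) =====
-- stated objective: alternative
-- what changed: Replaces A's union-find (parent-pointer forest with path compression and a find-per-table grouping pass) by a flat table-to-representative dict that relabels the whole smaller class on each union, so grouping needs no find at all.
import Mathlib
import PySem

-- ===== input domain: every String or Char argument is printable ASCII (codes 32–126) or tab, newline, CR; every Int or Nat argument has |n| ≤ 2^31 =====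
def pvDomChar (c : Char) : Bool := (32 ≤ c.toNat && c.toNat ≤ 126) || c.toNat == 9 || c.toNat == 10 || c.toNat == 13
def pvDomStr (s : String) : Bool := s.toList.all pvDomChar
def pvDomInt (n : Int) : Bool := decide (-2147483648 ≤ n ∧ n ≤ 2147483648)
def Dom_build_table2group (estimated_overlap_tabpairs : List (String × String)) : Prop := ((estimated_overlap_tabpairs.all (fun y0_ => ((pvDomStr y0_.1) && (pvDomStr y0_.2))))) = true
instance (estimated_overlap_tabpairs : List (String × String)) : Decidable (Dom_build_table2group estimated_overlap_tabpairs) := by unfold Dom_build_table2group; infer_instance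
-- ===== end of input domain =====

-- B replaces A's union-find forest (find with path compression) by a flat
-- table→representative map that relabels a whole class on each union (objective:
-- alternative data structure, same return value; neither program mutates its argument).

-- ===== PORT A =====
-- find's while loop; the fuel only bounds the iterations and is proved sufficient
-- below (the parent forest is acyclic, so chains are shorter than the dict size)
def pvFindLoop : Nat → PySem.Dict String String → String → PySem.Dict String String × String
  | 0, p, x => (p, x)
  | fuel+1, p, x =>
      let px := p.getD x x
      if px = x then (p, x)
      else
        let ppx := p.getD px px
        pvFindLoop fuel (p.insert x ppx) ppx

def pvFind (p : PySem.Dict String String) (x : String) :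
    PySem.Dict String String × String :=
  let p := if p.contains x then p else p.insert x x   -- if x not in self.parent: self.parent[x] = x
  pvFindLoop p.size p x

def pvUnion (p : PySem.Dict String String) (x y : String) : PySem.Dict String String :=
  let r := pvFind p y               -- Python evaluates the assignment's RHS find(y) first
  let r' := pvFind r.1 x
  r'.1.insert r'.2 r.2

def build_table2group (estimated_overlap_tabpairs : List (String × String)) : List (String × String) :=
  let parent := estimated_overlap_tabpairs.foldl (fun p tp => pvUnion p tp.1 tp.2) PySem.Dict.empty
  let st := parent.keys.foldl
      (fun (st : PySem.Dict String String × PySem.Dict String (List String)) table =>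
        let r := pvFind st.1 table
        (r.1, st.2.modify r.2 [] (· ++ [table])))
      (parent, PySem.Dict.empty)
  let t2g := (PySem.List.enumerate st.2.values 0).foldl
      (fun d it => it.2.foldl (fun d table => d.insert table ("group" ++ PySem.Int.toStr it.1)) d)
      PySem.Dict.empty
  t2g.items

-- ===== PORT B =====
def build_table2group_alt (estimated_overlap_tabpairs : List (String × String)) : List (String × String) :=
  let rep := estimated_overlap_tabpairs.foldl
      (fun (rep : PySem.Dict String String) tp =>
        let r2 := rep.getD tp.2 tp.2
        let rep := rep.setdefault tp.2 tp.2
        let r1 := rep.getD tp.1 tp.1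
        let rep := rep.setdefault tp.1 tp.1
        if r1 = r2 then rep
        else PySem.Dict.mk (rep.items.map (fun kv => (kv.1, if kv.2 = r1 then r2 else kv.2))))
      PySem.Dict.empty
  let buckets := rep.items.foldl
      (fun (b : PySem.Dict String (List String)) kv => b.modify kv.2 [] (· ++ [kv.1]))
      PySem.Dict.empty
  ((PySem.List.enumerate buckets.values 0).foldl
      (fun d it => it.2.foldl (fun d table => d.insert table ("group" ++ PySem.Int.toStr it.1)) d)
      PySem.Dict.empty).items

-- ===== PRECONDITION & SPEC =====
def Spec_build_table2group (estimated_overlap_tabpairs : List (String × String)) (out : List (String × String)) : Prop := out = build_table2group_alt estimated_overlap_tabpairs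
instance (estimated_overlap_tabpairs : List (String × String)) (out : List (String × String)) : Decidable (Spec_build_table2group estimated_overlap_tabpairs out) := by unfold Spec_build_table2group; infer_instance

-- ===== CLAIM (what is proved, stated in full; the proofs are below) =====
def Claim_equal_build_table2group : Prop := ∀ (estimated_overlap_tabpairs : List (String × String)), Dom_build_table2group estimated_overlap_tabpairs → Spec_build_table2group estimated_overlap_tabpairs (build_table2group estimated_overlap_tabpairs)

-- ===== LEMMAS AND PROOFS =====
def pvLbl (rep : PySem.Dict String String) (k : String) : String := rep.getD k k
def pvDec (p : PySem.Dict String String) (d : String → Nat) : Prop :=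
  ∀ k v, p.get? k = some v → v = k ∨ d v < d k
def pvInv (p rep : PySem.Dict String String) : Prop :=
  p.keys = rep.keys ∧ p.keys.Nodup ∧
  (∀ k v, p.get? k = some v → v ∈ p.keys ∧ pvLbl rep k = pvLbl rep v) ∧
  (∀ k, k ∈ p.keys → p.get? (pvLbl rep k) = some (pvLbl rep k)) ∧
  (∀ k, p.get? k = some k → pvLbl rep k = k) ∧
  (∃ d, pvDec p d)

theorem pvInv_empty : pvInv PySem.Dict.empty PySem.Dict.empty := by
  refine ⟨rfl, by simp [PySem.Dict.keys_empty], ?_, ?_, ?_, ⟨fun _ => 0, ?_⟩⟩ <;>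
    simp [pvDec, PySem.Dict.get?_empty, PySem.Dict.keys_empty]

theorem pv_mem_keys_of_get? (d : PySem.Dict String String) (k v : String)
    (h : d.get? k = some v) : k ∈ d.keys := by
  by_contra hk
  rw [← PySem.Dict.get?_eq_none_iff_not_mem_keys] at hk
  simp [hk] at h
  
theorem pv_get?_mk_map_val (l : List (String × String)) (f : String → String) (k : String) :
    (PySem.Dict.mk (l.map (fun kv => (kv.1, f kv.2)))).get? k
      = ((PySem.Dict.mk l).get? k).map f := by
  induction l with
  | nil => simp [show (PySem.Dict.mk ([] : List (String × String))).get? k = none from rfl]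
  | cons kv rest ih =>
      rw [List.map_cons, PySem.Dict.get?_mk_cons, PySem.Dict.get?_mk_cons]
      split_ifs <;> simp [ih]

def pvChain (p : PySem.Dict String String) : Nat → String → List String
  | 0, x => [x]
  | n+1, x =>
      let px := p.getD x x
      if px = x then [x] else x :: pvChain p n px

theorem pv_getD_some (p : PySem.Dict String String) {k v : String} (h : p.get? k = some v) :
    ∀ dflt, p.getD k dflt = v := by
  intro dflt; rw [PySem.Dict.getD_eq_get?_getD, h]; rfl

theorem pv_getD_none (p : PySem.Dict String String) {k : String} (h : p.get? k = none) :
    ∀ dflt, p.getD k dflt = dflt := by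
  intro dflt; rw [PySem.Dict.getD_eq_get?_getD, h]; rfl

theorem pv_getD_lt (p : PySem.Dict String String) (d : String → Nat) (hd : pvDec p d)
    (x : String) (hne : p.getD x x ≠ x) : d (p.getD x x) < d x := by
  rcases h : p.get? x with _ | v
  · simp [pv_getD_none p h] at hne
  · rw [pv_getD_some p h] at hne ⊢
    rcases hd x v h with rfl | hlt
    · exact absurd rfl hne
    · exact hlt

theorem pvChain_stable (p : PySem.Dict String String) (d : String → Nat) (hd : pvDec p d) :
    ∀ n m x, d x ≤ n → d x ≤ m → pvChain p n x = pvChain p m x := by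
  intro n
  induction n with
  | zero =>
      intro m x hx _
      have : p.getD x x = x := by
        by_contra hne
        have := pv_getD_lt p d hd x hne; omega
      cases m <;> simp [pvChain, this]
  | succ n ih =>
      intro m x hx hm
      by_cases hr : p.getD x x = x
      · cases m <;> simp [pvChain, hr]
      · have hlt := pv_getD_lt p d hd x hr
        rcases m with _ | m
        · omega
        · simp only [pvChain, hr]
          rw [ih m (p.getD x x) (by omega) (by omega)]

theorem pvChain_d_le (p : PySem.Dict String String) (d : String → Nat) (hd : pvDec p d) :
    ∀ n x b, b ∈ pvChain p n x → d b ≤ d x := by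
  intro n
  induction n with
  | zero => intro x b hb; simp [pvChain] at hb; subst hb; exact le_rfl
  | succ n ih =>
      intro x b hb
      by_cases hr : p.getD x x = x
      · simp [pvChain, hr] at hb; subst hb; omega
      · simp only [pvChain, if_neg hr, List.mem_cons] at hb
        rcases hb with rfl | hb
        · omega
        · have := ih _ _ hb
          have := pv_getD_lt p d hd x hr
          omega

theorem pvChain_nodup (p : PySem.Dict String String) (d : String → Nat) (hd : pvDec p d) :
    ∀ n x, (pvChain p n x).Nodup := by
  intro n
  induction n with
  | zero => intro x; simp [pvChain]
  | succ n ih =>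
      intro x
      by_cases hr : p.getD x x = x
      · simp [pvChain, hr]
      · simp only [pvChain, if_neg hr, List.nodup_cons]
        refine ⟨fun hx => ?_, ih _⟩
        have h1 := pvChain_d_le p d hd n _ _ hx
        have h2 := pv_getD_lt p d hd x hr
        omega

theorem pvChain_subset (p : PySem.Dict String String)
    (hvk : ∀ k v, p.get? k = some v → v ∈ p.keys) :
    ∀ n x b, x ∈ p.keys → b ∈ pvChain p n x → b ∈ p.keys := by
  intro n
  induction n with
  | zero => intro x b hx hb; simp [pvChain] at hb; subst hb; exact hx
  | succ n ih =>
      intro x b hx hb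
      by_cases hr : p.getD x x = x
      · simp [pvChain, hr] at hb; subst hb; exact hx
      · simp only [pvChain, if_neg hr, List.mem_cons] at hb
        rcases hb with rfl | hb
        · exact hx
        · refine ih _ _ ?_ hb
          rcases h : p.get? x with _ | v
          · exact absurd (pv_getD_none p h x) hr
          · rw [pv_getD_some p h]; exact hvk _ _ h

theorem pv_keys_length (p : PySem.Dict String String) : p.keys.length = p.size := by
  simp [PySem.Dict.keys, PySem.Dict.size]

theorem pvDec_bounded (p : PySem.Dict String String)
    (hvk : ∀ k v, p.get? k = some v → v ∈ p.keys)
    (hd : ∃ d, pvDec p d) :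
    ∃ d, pvDec p d ∧ ∀ k ∈ p.keys, d k < p.size := by
  obtain ⟨d, hd⟩ := hd
  refine ⟨fun k => (pvChain p (d k) k).length - 1, ?_, ?_⟩
  · intro k v hkv
    rcases hd k v hkv with rfl | hlt
    · exact Or.inl rfl
    · right
      show (pvChain p (d v) v).length - 1 < (pvChain p (d k) k).length - 1
      have hne : p.getD k k ≠ k := by
        rw [pv_getD_some p hkv]
        intro h; subst h; omega
      have hv : p.getD k k = v := pv_getD_some p hkv k
      have hdk : 1 ≤ d k := by omega
      have hstep : pvChain p (d k) k = k :: pvChain p (d k - 1) (p.getD k k) := by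
        rcases hn : d k with _ | n
        · omega
        · simp [pvChain, hne]
      have hstab : pvChain p (d k - 1) (p.getD k k) = pvChain p (d v) v := by
        rw [hv]; exact pvChain_stable p d hd _ _ v (by omega) le_rfl
      have hlen : 1 ≤ (pvChain p (d v) v).length := by
        (rcases hdv : d v with _ | m <;> simp [pvChain]) ; split_ifs <;> simp
      rw [hstep, hstab]
      simp only [List.length_cons]
      omega
  · intro k hk
    show (pvChain p (d k) k).length - 1 < p.size
    have hnd := pvChain_nodup p d hd (d k) k
    have hsub : pvChain p (d k) k ⊆ p.keys := fun b hb => pvChain_subset p hvk _ _ _ hk hb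
    have := (List.subperm_of_subset hnd hsub).length_le
    rw [pv_keys_length] at this
    have hlen : 1 ≤ (pvChain p (d k) k).length := by
      (rcases d k with _ | m <;> simp [pvChain]) ; split_ifs <;> simp
    omega


theorem pv_get?_of_mem_keys (p : PySem.Dict String String) (k : String) (hk : k ∈ p.keys) :
    ∃ v, p.get? k = some v := by
  rcases h : p.get? k with _ | v
  · rw [PySem.Dict.get?_eq_none_iff_not_mem_keys] at h; exact absurd hk h
  · exact ⟨v, rfl⟩

theorem pvFindLoop_ok (rep : PySem.Dict String String) (d : String → Nat) :
    ∀ fuel p x, pvInv p rep → pvDec p d → x ∈ p.keys → d x < fuel →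
    ∃ p', pvFindLoop fuel p x = (p', pvLbl rep x) ∧ pvInv p' rep ∧
      p'.keys = p.keys ∧ pvDec p' d := by
  intro fuel
  induction fuel with
  | zero => intro p x _ _ _ h; omega
  | succ fuel ih =>
      intro p x hInv hDec hx hfuel
      obtain ⟨hkeys, hnd, hvk, hroot, hrl, hex⟩ := hInv
      obtain ⟨px, hpx⟩ := pv_get?_of_mem_keys p x hx
      have hgd : p.getD x x = px := pv_getD_some p hpx x
      by_cases hr : px = x
      · refine ⟨p, ?_, ⟨hkeys, hnd, hvk, hroot, hrl, hex⟩, rfl, hDec⟩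
        rw [hr] at hpx
        simp [pvFindLoop, hgd, hr, hrl x hpx]
      · -- non-root step
        have hpxk : px ∈ p.keys := (hvk x px hpx).1
        obtain ⟨ppx, hppx⟩ := pv_get?_of_mem_keys p px hpxk
        have hgd2 : p.getD px px = ppx := pv_getD_some p hppx px
        have hppxk : ppx ∈ p.keys := (hvk px ppx hppx).1
        have hdpx : d px < d x := by
          rcases hDec x px hpx with rfl | h; · exact absurd rfl hr
          · exact h
        have hdppx : d ppx ≤ d px := by
          rcases hDec px ppx hppx with rfl | h; · exact le_rfl
          · omega
        have hppx_ne_x : ppx ≠ x := by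
          intro h; subst h
          rcases hDec px ppx hppx with h | h
          · subst h; omega
          · omega
        set p' := p.insert x ppx with hp'
        have hcx : p.contains x = true := by rw [PySem.Dict.contains_iff_mem_keys]; exact hx
        have hk' : p'.keys = p.keys := PySem.Dict.keys_insert_of_contains p ppx hcx
        have hget' : ∀ k, p'.get? k = if k = x then some ppx else p.get? k := fun k =>
          PySem.Dict.get?_insert _ _ _ _
        have hDec' : pvDec p' d := by
          intro k v hkv
          rw [hget'] at hkv
          split_ifs at hkv with hkx
          · subst hkx; cases hkv
            right; omega
          · exact hDec k v hkv
        have hInv' : pvInv p' rep := by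
          refine ⟨hk'.trans hkeys, hk' ▸ hnd, ?_, ?_, ?_, ⟨d, hDec'⟩⟩
          · intro k v hkv
            rw [hget'] at hkv
            split_ifs at hkv with hkx
            · subst hkx; cases hkv
              refine ⟨hk' ▸ hppxk, ?_⟩
              rw [(hvk _ _ hpx).2, (hvk _ _ hppx).2]
            · have := hvk k v hkv; exact ⟨hk' ▸ this.1, this.2⟩
          · intro k hk
            rw [hk'] at hk
            have hx_not_root : pvLbl rep k ≠ x := by
              intro h
              have := hroot k hk
              rw [h] at this
              rw [this] at hpx; cases hpx; exact hr rfl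
            rw [hget', if_neg hx_not_root]
            exact hroot k hk
          · intro k hkk
            rw [hget'] at hkk
            split_ifs at hkk with hkx
            · cases hkk; exact absurd rfl (hkx ▸ hppx_ne_x)
            · exact hrl k hkk
        have hlblx : pvLbl rep x = pvLbl rep ppx := by
          rw [(hvk x px hpx).2, (hvk px ppx hppx).2]
        obtain ⟨pf, hrun, hInvf, hkf, hDecf⟩ :=
          ih p' ppx hInv' hDec' (hk' ▸ hppxk) (by omega)
        refine ⟨pf, ?_, hInvf, hkf.trans hk', hDecf⟩
        simp only [pvFindLoop, hgd, if_neg hr, hgd2]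
        rw [hrun, hlblx]


theorem pvInv_insert_fresh (p rep : PySem.Dict String String) (x : String)
    (h : pvInv p rep) (hx : x ∉ p.keys) :
    pvInv (p.insert x x) (rep.insert x x) := by
  obtain ⟨hkeys, hnd, hvk, hroot, hrl, d, hd⟩ := h
  have hcx : p.contains x = false := by
    rw [← Bool.not_eq_true, PySem.Dict.contains_iff_mem_keys]; exact hx
  have hk' : (p.insert x x).keys = p.keys ++ [x] :=
    PySem.Dict.keys_insert_of_not_contains p x hcx
  have hget' : ∀ k, (p.insert x x).get? k = if k = x then some x else p.get? k := fun k =>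
    PySem.Dict.get?_insert _ _ _ _
  have hlbl' : ∀ k, pvLbl (rep.insert x x) k = if k = x then x else pvLbl rep k := by
    intro k
    unfold pvLbl
    rw [PySem.Dict.getD_insert]
  have hmemne : ∀ k, k ∈ p.keys → k ≠ x := fun k hk he => hx (he ▸ hk)
  refine ⟨?_, ?_, ?_, ?_, ?_, ⟨fun k => if k = x then 0 else d k, ?_⟩⟩
  · rw [hk', hkeys, PySem.Dict.keys_insert_of_not_contains rep x
      (by rw [← Bool.not_eq_true, PySem.Dict.contains_iff_mem_keys, ← hkeys]; exact hx)]
  · rw [hk']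
    simp only [List.nodup_append, List.nodup_cons, List.nodup_nil]
    refine ⟨hnd, by simp, ?_⟩
    intro a ha b hb
    simp only [List.mem_singleton] at hb; subst hb
    exact fun he => hx (he ▸ ha)
  · intro k v hkv
    rw [hget'] at hkv
    split_ifs at hkv with hkx
    · cases hkv; subst hkx
      exact ⟨by rw [hk']; simp, rfl⟩
    · obtain ⟨hv, hl⟩ := hvk k v hkv
      have hkk := pv_mem_keys_of_get? p k v hkv
      rw [hlbl', hlbl', if_neg (hmemne k hkk), if_neg (hmemne v hv)]
      exact ⟨by rw [hk']; exact List.mem_append_left _ hv, hl⟩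
  · intro k hk
    rw [hk', List.mem_append] at hk
    rcases hk with hk | hk
    · have hlk := hroot k hk
      have hlmem := pv_mem_keys_of_get? p _ _ hlk
      rw [hlbl', if_neg (hmemne k hk), hget', if_neg (hmemne _ hlmem)]
      exact hlk
    · simp only [List.mem_singleton] at hk; subst hk
      rw [hlbl', if_pos rfl, hget', if_pos rfl]
  · intro k hkk
    rw [hget'] at hkk
    split_ifs at hkk with hkx
    · subst hkx; rw [hlbl', if_pos rfl]
    · have hkm := pv_mem_keys_of_get? p k k hkk
      rw [hlbl', if_neg (hmemne k hkm)]
      exact hrl k hkk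
  · intro k v hkv
    rw [hget'] at hkv
    split_ifs at hkv with hkx
    · subst hkx; cases hkv; exact Or.inl rfl
    · have hkm := pv_mem_keys_of_get? p k v hkv
      rcases hd k v hkv with rfl | hlt
      · exact Or.inl rfl
      · right
        show (if v = x then 0 else d v) < (if k = x then 0 else d k)
        rw [if_neg (hmemne v (hvk k v hkv).1), if_neg hkx]
        exact hlt

theorem pvFind_ok (p rep : PySem.Dict String String) (x : String) (h : pvInv p rep) :
    ∃ p', pvFind p x = (p', pvLbl (rep.setdefault x x) x) ∧
      pvInv p' (rep.setdefault x x) ∧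
      p'.keys = (if p.contains x = true then p.keys else p.keys ++ [x]) := by
  by_cases hc : p.contains x = true
  · have hx : x ∈ p.keys := (PySem.Dict.contains_iff_mem_keys _ _).1 hc
    have hrepc : rep.contains x = true := by
      rw [PySem.Dict.contains_iff_mem_keys, ← h.1]; exact hx
    rw [PySem.Dict.setdefault_of_contains rep x hrepc]
    obtain ⟨d, hd, hdb⟩ := pvDec_bounded p (fun k v hkv => (h.2.2.1 k v hkv).1) h.2.2.2.2.2
    obtain ⟨p', hrun, hinv', hk', _⟩ :=
      pvFindLoop_ok rep d p.size p x h hd hx (hdb x hx)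
    refine ⟨p', ?_, hinv', by rw [if_pos hc]; exact hk'⟩
    unfold pvFind
    rw [if_pos hc]
    exact hrun
  · have hx : x ∉ p.keys := fun hm =>
      hc ((PySem.Dict.contains_iff_mem_keys _ _).2 hm)
    have hrepc : rep.contains x = false := by
      rw [← Bool.not_eq_true, PySem.Dict.contains_iff_mem_keys, ← h.1]; exact hx
    rw [PySem.Dict.setdefault_of_not_contains rep x hrepc]
    have hinv0 := pvInv_insert_fresh p rep x h hx
    have hx0 : x ∈ (p.insert x x).keys := by
      rw [PySem.Dict.keys_insert_of_not_contains p x (by simpa using hc)]; simp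
    obtain ⟨d, hd, hdb⟩ := pvDec_bounded (p.insert x x)
      (fun k v hkv => (hinv0.2.2.1 k v hkv).1) hinv0.2.2.2.2.2
    obtain ⟨p', hrun, hinv', hk', _⟩ :=
      pvFindLoop_ok (rep.insert x x) d (p.insert x x).size (p.insert x x) x
        hinv0 hd hx0 (hdb x hx0)
    refine ⟨p', ?_, hinv', ?_⟩
    · unfold pvFind
      rw [if_neg hc]
      exact hrun
    · rw [if_neg hc, hk', PySem.Dict.keys_insert_of_not_contains p x (by simpa using hc)]


theorem pv_keys_mk_map_val (rep : PySem.Dict String String) (f : String → String) :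
    (PySem.Dict.mk (rep.items.map (fun kv => (kv.1, f kv.2)))).keys = rep.keys := by
  simp [PySem.Dict.keys, List.map_map]

theorem pvLbl_relabel (rep : PySem.Dict String String) (a b k : String)
    (ha : a ∈ rep.keys)  :
    pvLbl (PySem.Dict.mk (rep.items.map (fun kv => (kv.1, if kv.2 = a then b else kv.2)))) k
      = if pvLbl rep k = a then b else pvLbl rep k := by
  have hget : ∀ j, (PySem.Dict.mk (rep.items.map
      (fun kv => (kv.1, if kv.2 = a then b else kv.2)))).get? j
        = (rep.get? j).map (fun v => if v = a then b else v) := by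
    intro j
    have := pv_get?_mk_map_val rep.items (fun v => if v = a then b else v) j
    exact this
  unfold pvLbl
  rcases h : rep.get? k with _ | v
  · have hk : k ∉ rep.keys := (PySem.Dict.get?_eq_none_iff_not_mem_keys _ _).1 h
    have hka : k ≠ a := fun he => hk (he ▸ ha)
    rw [pv_getD_none _ (by rw [hget, h]; rfl), pv_getD_none rep h, if_neg hka]
  · rw [pv_getD_some rep h, pv_getD_some _ (by rw [hget, h]; rfl)]

theorem pv_lbl_setdefault (rep : PySem.Dict String String) (x : String) :
    rep.getD x x = pvLbl (rep.setdefault x x) x := by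
  unfold pvLbl
  rw [PySem.Dict.getD_setdefault_self]

theorem pv_mem_keys_setdefault_self (rep : PySem.Dict String String) (x : String) :
    x ∈ (rep.setdefault x x).keys := by
  rw [← PySem.Dict.contains_iff_mem_keys, PySem.Dict.contains_setdefault]
  simp

theorem pv_mem_keys_setdefault (rep : PySem.Dict String String) (x k : String)
    (h : k ∈ rep.keys) : k ∈ (rep.setdefault x x).keys := by
  rw [← PySem.Dict.contains_iff_mem_keys, PySem.Dict.contains_setdefault]
  rw [← PySem.Dict.contains_iff_mem_keys] at h
  simp [h]

theorem pvInv_insert_root_self (p rep : PySem.Dict String String) (r : String)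
    (h : pvInv p rep) (hr : p.get? r = some r) :
    pvInv (p.insert r r) rep := by
  obtain ⟨hkeys, hnd, hvk, hroot, hrl, d, hd⟩ := h
  have hc : p.contains r = true := by
    rw [PySem.Dict.contains_iff_mem_keys]; exact pv_mem_keys_of_get? p r r hr
  have hk' : (p.insert r r).keys = p.keys := PySem.Dict.keys_insert_of_contains p r hc
  have hget' : ∀ k, (p.insert r r).get? k = if k = r then some r else p.get? k := fun k =>
    PySem.Dict.get?_insert _ _ _ _
  refine ⟨hk' ▸ hkeys, hk' ▸ hnd, ?_, ?_, ?_, ⟨d, ?_⟩⟩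
  · intro k v hkv
    rw [hget'] at hkv
    split_ifs at hkv with hkx
    · subst hkx; cases hkv
      exact ⟨hk' ▸ pv_mem_keys_of_get? p _ _ hr, rfl⟩
    · have := hvk k v hkv; exact ⟨hk' ▸ this.1, this.2⟩
  · intro k hk
    rw [hk'] at hk
    rw [hget']
    split_ifs with hlr
    · rw [hlr]
    · exact hroot k hk
  · intro k hkk
    rw [hget'] at hkk
    split_ifs at hkk with hkx
    · subst hkx; exact hrl _ hr
    · exact hrl k hkk
  · intro k v hkv
    rw [hget'] at hkv
    split_ifs at hkv with hkx
    · subst hkx; cases hkv; exact Or.inl rfl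
    · exact hd k v hkv

theorem pvInv_union_step (p2 rep2 : PySem.Dict String String) (rx ry : String)
    (h : pvInv p2 rep2)
    (hrx : p2.get? rx = some rx) (hlrx : pvLbl rep2 rx = rx)
    (hry : p2.get? ry = some ry) (hlry : pvLbl rep2 ry = ry)
    (hne : rx ≠ ry) :
    pvInv (p2.insert rx ry)
      (PySem.Dict.mk (rep2.items.map (fun kv => (kv.1, if kv.2 = rx then ry else kv.2)))) := by
  obtain ⟨hkeys, hnd, hvk, hroot, hrl, d, hd⟩ := h
  have hrxk : rx ∈ p2.keys := pv_mem_keys_of_get? p2 _ _ hrx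
  have hryk : ry ∈ p2.keys := pv_mem_keys_of_get? p2 _ _ hry
  have hrndk : rep2.keys.Nodup := hkeys ▸ hnd
  have hrxrep : rx ∈ rep2.keys := hkeys ▸ hrxk
  set rep3 := PySem.Dict.mk (rep2.items.map (fun kv => (kv.1, if kv.2 = rx then ry else kv.2)))
    with hrep3
  have hlbl : ∀ k, pvLbl rep3 k = if pvLbl rep2 k = rx then ry else pvLbl rep2 k := fun k =>
    pvLbl_relabel rep2 rx ry k hrxrep
  have hc : p2.contains rx = true := by
    rw [PySem.Dict.contains_iff_mem_keys]; exact hrxk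
  have hk' : (p2.insert rx ry).keys = p2.keys := PySem.Dict.keys_insert_of_contains p2 ry hc
  have hget' : ∀ k, (p2.insert rx ry).get? k = if k = rx then some ry else p2.get? k := fun k =>
    PySem.Dict.get?_insert _ _ _ _
  refine ⟨?_, hk' ▸ hnd, ?_, ?_, ?_, ⟨fun k => if pvLbl rep2 k = rx then d k + d ry + 1 else d k, ?_⟩⟩
  · rw [hk', hkeys]
    exact (pv_keys_mk_map_val rep2 (fun v => if v = rx then ry else v)).symm
  · intro k v hkv
    rw [hget'] at hkv
    split_ifs at hkv with hkx
    · cases hkv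
      refine ⟨hk' ▸ hryk, ?_⟩
      rw [hlbl, hlbl, hkx, hlrx, hlry, if_pos rfl]
      simp
    · obtain ⟨hv, hl⟩ := hvk k v hkv
      exact ⟨hk' ▸ hv, by rw [hlbl, hlbl, hl]⟩
  · intro k hk
    rw [hk'] at hk
    rw [hlbl, hget']
    by_cases h1 : pvLbl rep2 k = rx
    · simp only [if_pos h1]
      rw [if_neg (show ¬ ry = rx from fun hh => hne hh.symm)]
      exact hry
    · simp only [if_neg h1]
      exact hroot k hk
  · intro k hkk
    rw [hget'] at hkk
    split_ifs at hkk with hkx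
    · cases hkk; exact absurd (hkx.symm) (fun hh => hne (hh ▸ rfl))
    · have := hrl k hkk
      rw [hlbl, this, if_neg hkx]
  · intro k v hkv
    rw [hget'] at hkv
    split_ifs at hkv with hkx
    · cases hkv
      right
      rw [hkx]
      show (if pvLbl rep2 ry = rx then d ry + d ry + 1 else d ry)
        < (if pvLbl rep2 rx = rx then d rx + d ry + 1 else d rx)
      rw [hlry, hlrx, if_neg (fun hh => hne hh.symm), if_pos rfl]
      omega
    · have hl := (hvk k v hkv).2
      rcases hd k v hkv with rfl | hlt
      · exact Or.inl rfl
      · right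
        show (if pvLbl rep2 v = rx then d v + d ry + 1 else d v) < (if pvLbl rep2 k = rx then d k + d ry + 1 else d k)
        rw [hl]
        split_ifs <;> omega

theorem pv_lbl_setdefault_mem (rep : PySem.Dict String String) (x k : String)
    (hk : k ∈ rep.keys) : pvLbl (rep.setdefault x x) k = pvLbl rep k := by
  by_cases hc : rep.contains x = true
  · rw [PySem.Dict.setdefault_of_contains rep x hc]
  · rw [PySem.Dict.setdefault_of_not_contains rep x (by simpa using hc)]
    unfold pvLbl
    rw [PySem.Dict.getD_insert, if_neg]
    intro he
    exact hc ((PySem.Dict.contains_iff_mem_keys _ _).2 (he ▸ hk))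

theorem pvUnion_ok (p rep : PySem.Dict String String) (t1 t2 : String) (h : pvInv p rep) :
    pvInv (pvUnion p t1 t2)
      (let r2 := rep.getD t2 t2
       let rep := rep.setdefault t2 t2
       let r1 := rep.getD t1 t1
       let rep := rep.setdefault t1 t1
       if r1 = r2 then rep
       else PySem.Dict.mk (rep.items.map (fun kv => (kv.1, if kv.2 = r1 then r2 else kv.2)))) := by
  obtain ⟨p1, hf1, hinv1, _⟩ := pvFind_ok p rep t2 h
  obtain ⟨p2, hf2, hinv2, _⟩ := pvFind_ok p1 (rep.setdefault t2 t2) t1 hinv1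
  set rep1 := rep.setdefault t2 t2 with hrep1
  set rep2 := rep1.setdefault t1 t1 with hrep2
  set ry := pvLbl rep1 t2 with hry0
  set rx := pvLbl rep2 t1 with hrx0
  have hr2 : rep.getD t2 t2 = ry := pv_lbl_setdefault rep t2
  have hr1 : rep1.getD t1 t1 = rx := pv_lbl_setdefault rep1 t1
  have hUnion : pvUnion p t1 t2 = p2.insert rx ry := by
    simp only [pvUnion, hf1, hf2]
  have ht2r1 : t2 ∈ rep1.keys := pv_mem_keys_setdefault_self rep t2
  have hry2 : ry = pvLbl rep2 t2 := (pv_lbl_setdefault_mem rep1 t1 t2 ht2r1).symm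
  have ht1r2 : t1 ∈ rep2.keys := pv_mem_keys_setdefault_self rep1 t1
  have ht2r2 : t2 ∈ rep2.keys := pv_mem_keys_setdefault rep1 t1 t2 ht2r1
  have ht1p2 : t1 ∈ p2.keys := hinv2.1 ▸ ht1r2
  have ht2p2 : t2 ∈ p2.keys := hinv2.1 ▸ ht2r2
  have hrx_root : p2.get? rx = some rx := hinv2.2.2.2.1 t1 ht1p2
  have hry_root : p2.get? ry = some ry := by
    rw [hry2]; exact hinv2.2.2.2.1 t2 ht2p2
  have hlrx : pvLbl rep2 rx = rx := hinv2.2.2.2.2.1 rx hrx_root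
  have hlry : pvLbl rep2 ry = ry := hinv2.2.2.2.2.1 ry hry_root
  show pvInv (pvUnion p t1 t2)
      (if rep1.getD t1 t1 = rep.getD t2 t2 then rep2
       else PySem.Dict.mk (rep2.items.map
         (fun kv => (kv.1, if kv.2 = rep1.getD t1 t1 then rep.getD t2 t2 else kv.2))))
  rw [hUnion, hr1, hr2]
  by_cases heq : rx = ry
  · rw [if_pos heq, heq]
    exact pvInv_insert_root_self p2 rep2 ry hinv2 hry_root
  · rw [if_neg heq]
    exact pvInv_union_step p2 rep2 rx ry hinv2 hrx_root hlrx hry_root hlry heq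

theorem pvPhase1 (pairs : List (String × String)) :
    ∀ p rep, pvInv p rep →
    pvInv (pairs.foldl (fun p tp => pvUnion p tp.1 tp.2) p)
      (pairs.foldl
        (fun (rep : PySem.Dict String String) tp =>
          let r2 := rep.getD tp.2 tp.2
          let rep := rep.setdefault tp.2 tp.2
          let r1 := rep.getD tp.1 tp.1
          let rep := rep.setdefault tp.1 tp.1
          if r1 = r2 then rep
          else PySem.Dict.mk (rep.items.map (fun kv => (kv.1, if kv.2 = r1 then r2 else kv.2)))) rep) := by
  induction pairs with
  | nil => intro p rep h; exact h
  | cons tp rest ih =>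
      intro p rep h
      simp only [List.foldl_cons]
      exact ih _ _ (pvUnion_ok p rep tp.1 tp.2 h)

theorem pvPhase2 (rep : PySem.Dict String String) :
    ∀ (ks : List String) p (gm : PySem.Dict String (List String)),
    pvInv p rep → (∀ t ∈ ks, t ∈ p.keys) →
    (ks.foldl
      (fun (st : PySem.Dict String String × PySem.Dict String (List String)) table =>
        let r := pvFind st.1 table
        (r.1, st.2.modify r.2 [] (· ++ [table]))) (p, gm)).2
    = ks.foldl (fun gm t => gm.modify (pvLbl rep t) [] (· ++ [t])) gm := by
  intro ks
  induction ks with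
  | nil => intro p gm _ _; rfl
  | cons t rest ih =>
      intro p gm hInv hmem
      have ht : t ∈ p.keys := hmem t (List.mem_cons_self)
      have htr : t ∈ rep.keys := hInv.1 ▸ ht
      have hcon : rep.contains t = true := (PySem.Dict.contains_iff_mem_keys _ _).2 htr
      obtain ⟨p', hf, hinv', hk'⟩ := pvFind_ok p rep t hInv
      rw [PySem.Dict.setdefault_of_contains rep t hcon] at hf hinv'
      have hcp : p.contains t = true := (PySem.Dict.contains_iff_mem_keys _ _).2 ht
      rw [if_pos hcp] at hk'
      simp only [List.foldl_cons, hf]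
      exact ih p' _ hinv' (fun a ha => hk' ▸ hmem a (List.mem_cons_of_mem _ ha))



theorem build_eq (pairs : List (String × String)) :
    build_table2group pairs = build_table2group_alt pairs := by
  have hInv := pvPhase1 pairs PySem.Dict.empty PySem.Dict.empty pvInv_empty
  set parent := pairs.foldl (fun p tp => pvUnion p tp.1 tp.2) PySem.Dict.empty with hparent
  set rep := pairs.foldl
      (fun (rep : PySem.Dict String String) tp =>
        let r2 := rep.getD tp.2 tp.2
        let rep := rep.setdefault tp.2 tp.2
        let r1 := rep.getD tp.1 tp.1
        let rep := rep.setdefault tp.1 tp.1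
        if r1 = r2 then rep
        else PySem.Dict.mk (rep.items.map (fun kv => (kv.1, if kv.2 = r1 then r2 else kv.2))))
      PySem.Dict.empty with hrep
  have hgmA : (parent.keys.foldl
      (fun (st : PySem.Dict String String × PySem.Dict String (List String)) table =>
        let r := pvFind st.1 table
        (r.1, st.2.modify r.2 [] (· ++ [table])))
      (parent, PySem.Dict.empty)).2
      = parent.keys.foldl (fun gm t => gm.modify (pvLbl rep t) [] (· ++ [t])) PySem.Dict.empty :=
    pvPhase2 rep parent.keys parent PySem.Dict.empty hInv (fun _ ht => ht)
  have hnd : rep.keys.Nodup := hInv.1 ▸ hInv.2.1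
  have hgmB : (rep.items.foldl
      (fun (b : PySem.Dict String (List String)) kv => b.modify kv.2 [] (· ++ [kv.1]))
      PySem.Dict.empty)
      = rep.keys.foldl (fun gm t => gm.modify (pvLbl rep t) [] (· ++ [t])) PySem.Dict.empty := by
    rw [PySem.Dict.items_eq_map_keys rep hnd "", List.foldl_map]
    refine PySem.List.foldl_congr_mem _ _ _ _ ?_
    intro acc k hk
    obtain ⟨v, hv⟩ := pv_get?_of_mem_keys rep k hk
    simp only [pv_getD_some rep hv, pvLbl]
  show ((PySem.List.enumerate
      ((parent.keys.foldl
        (fun (st : PySem.Dict String String × PySem.Dict String (List String)) table =>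
          let r := pvFind st.1 table
          (r.1, st.2.modify r.2 [] (· ++ [table])))
        (parent, PySem.Dict.empty)).2).values 0).foldl
      (fun d it => it.2.foldl (fun d table => d.insert table ("group" ++ PySem.Int.toStr it.1)) d)
      PySem.Dict.empty).items
    = ((PySem.List.enumerate
      ((rep.items.foldl
        (fun (b : PySem.Dict String (List String)) kv => b.modify kv.2 [] (· ++ [kv.1]))
        PySem.Dict.empty)).values 0).foldl
      (fun d it => it.2.foldl (fun d table => d.insert table ("group" ++ PySem.Int.toStr it.1)) d)
      PySem.Dict.empty).items
  rw [hgmA, hgmB, hInv.1]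

-- ===== VERDICT (by name: the statement is the Claim_ definition above) =====
theorem build_table2group_spec : Claim_equal_build_table2group := by
  intro pairs _
  exact build_eq pairs
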